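-- pv_equiv track=rewrite | github.com/bpnsingh/practice | scaler/day16/magic_number.py | solve
-- ===== SOURCE A (Python) =====
-- def to_binary(N):
--     ans=""
--     while N > 0:
--         temp = N % 2
--         ans = ans + str(temp)
--         N = N //2
--     return ans[::-1]
--
-- def solve(A):
--     binary_repr = to_binary(A)
--     M = 5
--     N = len(binary_repr)
--     sum = 0
--     for index in range(N-1,-1,-1):
--         sum = sum + (int(binary_repr[index])*M)
--         M = M * 5
--     return sum
-- ===== SOURCE B (Python) =====
-- def solve(A):
--     total = 0
--     power = 5
--     while A > 0:
--         if A % 2: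
--             total = total + power
--         power = power * 5
--         A = A // 2
--     return total
-- ===== Notes on version B (the rewrite author's own statement) =====
-- stated objective: simpler
-- what changed: B drops the intermediate binary string entirely and computes the weighted sum in one pass over A's bits (test A%2, accumulate power-of-5, halve), instead of A's build-string-then-reverse-then-index-backwards two-phase scheme.
import Mathlib
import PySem

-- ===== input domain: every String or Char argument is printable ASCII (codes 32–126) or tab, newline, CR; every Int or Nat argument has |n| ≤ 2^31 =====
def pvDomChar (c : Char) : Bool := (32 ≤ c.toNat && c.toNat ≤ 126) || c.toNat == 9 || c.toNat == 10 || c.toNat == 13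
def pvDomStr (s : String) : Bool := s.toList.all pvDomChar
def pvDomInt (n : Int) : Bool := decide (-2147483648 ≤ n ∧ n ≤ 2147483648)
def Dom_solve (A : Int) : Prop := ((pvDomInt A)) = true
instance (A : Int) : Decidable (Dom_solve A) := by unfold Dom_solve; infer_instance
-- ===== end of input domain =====

-- B replaces A's build-binary-string / reverse / index-backwards scheme by a single
-- arithmetic loop over A's bits; return values are proved equal for every Int input.

-- ===== PORT A =====
-- int(c) for the one-character string c (exact here: c is always '0' or '1')
def charInt (c : Char) : Int := (PySem.Int.ofStr? (String.ofList [c])).getD 0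

-- the while-loop of to_binary: ans = ans + str(N % 2); N = N // 2
def tbLoop (N : Int) (ans : List Char) : List Char :=
  if N > 0 then
    tbLoop (PySem.Int.floordiv N 2) (ans ++ PySem.Int.toChars (PySem.Int.mod N 2))
  else ans
termination_by N.toNat
decreasing_by
  rw [PySem.Int.floordiv_eq_ediv_of_pos (by omega)]
  omega

-- ans[::-1]
def to_binary (N : Int) : List Char :=
  (PySem.List.slice? (tbLoop N []) none none (-1)).getD []

def solve (A : Int) : Int :=
  let binary_repr := to_binary A
  let N : Int := binary_repr.length
  -- for index in range(N-1,-1,-1): sum += int(binary_repr[index])*M; M *= 5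
  -- (pyGetD's default is never used: every index is in range)
  ((PySem.List.pyRange (N - 1) (-1) (-1)).foldl
    (fun (sm : Int × Int) idx =>
      (sm.1 + charInt (PySem.List.pyGetD binary_repr idx '0') * sm.2, sm.2 * 5))
    (0, 5)).1

-- ===== PORT B =====
def altLoop (A total power : Int) : Int :=
  if A > 0 then
    altLoop (PySem.Int.floordiv A 2)
      (if PySem.Int.mod A 2 ≠ 0 then total + power else total)
      (power * 5)
  else total
termination_by A.toNat
decreasing_by
  rw [PySem.Int.floordiv_eq_ediv_of_pos (by omega)]
  omega

def solve_alt (A : Int) : Int := altLoop A 0 5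

-- ===== PRECONDITION & SPEC =====
def Spec_solve (A : Int) (out : Int) : Prop := out = solve_alt A
instance (A : Int) (out : Int) : Decidable (Spec_solve A out) := by unfold Spec_solve; infer_instance

-- ===== CLAIM (what is proved, stated in full; the proofs are below) =====
def Claim_equal_solve : Prop := ∀ (A : Int), Dom_solve A → Spec_solve A (solve A)

-- ===== LEMMAS AND PROOFS =====

-- the common fold both sides reduce to: one step per binary digit (LSB first)
def stepc (sm : Int × Int) (c : Char) : Int × Int := (sm.1 + charInt c * sm.2, sm.2 * 5)

-- the index sequence [n-1, n-2, ..., 0] as Int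
def idxs (n : Nat) : List Int := ((List.range n).map (fun (k : Nat) => (k : Int))).reverse

theorem tbLoop_append (N : Int) : ∀ ans, tbLoop N ans = ans ++ tbLoop N [] := by
  induction hN : N.toNat using Nat.strong_induction_on generalizing N with
  | _ n ih =>
    intro ans
    by_cases h : N > 0
    · have hd : (PySem.Int.floordiv N 2).toNat < n := by
        rw [PySem.Int.floordiv_eq_ediv_of_pos (by omega)]; omega
      rw [tbLoop, if_pos h]
      conv_rhs => rw [tbLoop, if_pos h]
      rw [ih _ hd _ rfl, ih _ hd _ rfl ([] ++ PySem.Int.toChars (PySem.Int.mod N 2))]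
      simp
    · rw [tbLoop, if_neg h]
      conv_rhs => rw [tbLoop, if_neg h]
      simp

theorem pyRange_idxs (n : Nat) :
    PySem.List.pyRange ((n : Int) - 1) (-1) (-1) = idxs n := by
  rw [PySem.List.pyRange_neg_one_eq_reverse]
  have h1 : (-1 : Int) + 1 = 0 := by omega
  have h2 : (n : Int) - 1 + 1 = (n : Int) := by omega
  rw [h1, h2, PySem.List.pyRange_one]
  have hz : ((n : Int) - 0).toNat = n := by omega
  rw [hz]
  unfold idxs
  congr 1
  apply List.map_congr_left
  intro k _
  simp

theorem idxs_succ (n : Nat) : idxs (n + 1) = (n : Int) :: idxs n := by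
  simp [idxs, List.range_succ]

theorem fold_rev_idx (l : List Char) :
    ∀ s M : Int,
      (idxs l.length).foldl
        (fun (sm : Int × Int) idx =>
          (sm.1 + charInt (PySem.List.pyGetD l.reverse idx '0') * sm.2, sm.2 * 5)) (s, M)
      = l.foldl stepc (s, M) := by
  induction l with
  | nil => intro s M; simp [idxs]
  | cons c t ih =>
    intro s M
    have hlen : (c :: t).length = t.length + 1 := rfl
    rw [hlen, idxs_succ]
    have hrev : (c :: t).reverse = t.reverse ++ [c] := by simp
    rw [List.foldl_cons, hrev]
    have h1 : PySem.List.pyGetD (t.reverse ++ [c]) ((t.length : Int)) '0' = c := by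
      rw [PySem.List.pyGetD_natCast]
      simp [List.getD]
    rw [h1]
    have h2 : ∀ (sm : Int × Int) (idx : Int), idx ∈ idxs t.length →
        (sm.1 + charInt (PySem.List.pyGetD (t.reverse ++ [c]) idx '0') * sm.2, sm.2 * 5)
        = (sm.1 + charInt (PySem.List.pyGetD t.reverse idx '0') * sm.2, sm.2 * 5) := by
      intro sm idx hmem
      unfold idxs at hmem
      rw [List.mem_reverse, List.mem_map] at hmem
      obtain ⟨k, hk, he⟩ := hmem
      rw [List.mem_range] at hk
      subst he
      rw [PySem.List.pyGetD_natCast, PySem.List.pyGetD_natCast]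
      have hk' : k < t.reverse.length := by simpa using hk
      simp [List.getD, List.getElem?_append_left hk']
    rw [PySem.List.foldl_congr_mem (idxs t.length) _ _ _ h2, ih]
    simp [stepc]

theorem solve_eq_fold (A : Int) :
    solve A = ((tbLoop A []).foldl stepc (0, 5)).1 := by
  have hrev : to_binary A = (tbLoop A []).reverse := by
    unfold to_binary
    rw [PySem.List.slice?_none_none_neg_one]
    rfl
  unfold solve
  simp only [hrev, List.length_reverse]
  rw [pyRange_idxs, fold_rev_idx]

theorem altLoop_eq_fold (A : Int) (t p : Int) :
    altLoop A t p = ((tbLoop A []).foldl stepc (t, p)).1 := by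
  induction A, t, p using altLoop.induct with
  | case1 A t p h ih =>
    simp only [dite_eq_ite] at ih
    rw [altLoop, if_pos h, ih]
    conv_rhs => rw [tbLoop, if_pos h, List.nil_append,
        tbLoop_append (PySem.Int.floordiv A 2) (PySem.Int.toChars (PySem.Int.mod A 2))]
    rw [List.foldl_append]
    have hm : PySem.Int.mod A 2 = 0 ∨ PySem.Int.mod A 2 = 1 := by
      rw [PySem.Int.mod_eq_emod_of_pos (by omega)]
      omega
    have hv0 : charInt '0' = 0 := by decide
    have hv1 : charInt '1' = 1 := by decide
    have hc0 : PySem.Int.toChars 0 = ['0'] := by decide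
    have hc1 : PySem.Int.toChars 1 = ['1'] := by decide
    rcases hm with hm | hm <;> rw [hm]
    · rw [hc0]; simp [stepc, hv0]
    · rw [hc1]; simp [stepc, hv1]
  | case2 A t p h =>
    rw [altLoop, if_neg h, tbLoop, if_neg h]
    simp

-- ===== VERDICT (by name: the statement is the Claim_ definition above) =====
theorem solve_spec : Claim_equal_solve := by
  intro A _
  unfold Spec_solve solve_alt
  rw [solve_eq_fold, altLoop_eq_fold]
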